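-- pv_equiv track=rewrite | github.com/noalee01/OptimizedImageProject | oldVersion/image_editor.py | create_small_mat
-- ===== SOURCE A (Python) =====
-- def create_small_mat(image, cell, size):
--     x = size//2
--     rows = range(cell[0]-x, cell[0]+x+1)
--     cols = range(cell[1]-x, cell[1]+x+1)
--     mat = []
--     for i in range(size):
--         temp_line = []
--         for j in range(size):
--             if rows[i]<0 or rows[i]>=len(image) or cols[j]<0 or cols[j]>=len(image[0]):
--                 temp_line.append(image[cell[0]][cell[1]])
--             else:
--                 temp_line.append(image[rows[i]][cols[j]])
--         mat.append(temp_line)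
--     return mat
-- ===== SOURCE B (Python) =====
-- def create_small_mat(image, cell, size):
--     # fill-with-center-value, then copy the contiguous in-bounds slice per row
--     if size <= 0:
--         return []
--     v = image[cell[0]][cell[1]]
--     h, w = len(image), len(image[0])
--     x = size // 2
--     r0, c0 = cell[0] - x, cell[1] - x
--     lo = max(0, -c0)          # first column index whose image column is valid
--     hi = min(size, w - c0)    # one past the last valid column index
--     blank = [v] * size
--     mat = []
--     for i in range(size):
--         r = r0 + i
--         if 0 <= r < h and lo < hi:
--             mat.append([v] * lo + image[r][c0 + lo:c0 + hi] + [v] * (size - hi))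
--         else:
--             mat.append(blank[:])
--     return mat
-- ===== Notes on version B (the rewrite author's own statement) =====
-- stated objective: alternative
-- what changed: Replaces A's per-cell four-way bounds test inside a doubly nested loop by computing the valid column window once and building each row as fill-with-center-value plus one contiguous list slice of the image row.
-- outside the precondition, e.g. on create_small_mat([[1], [2, 3]], (1, 1), 1): A returns [[3]], B returns [[3]]
import Mathlib
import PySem

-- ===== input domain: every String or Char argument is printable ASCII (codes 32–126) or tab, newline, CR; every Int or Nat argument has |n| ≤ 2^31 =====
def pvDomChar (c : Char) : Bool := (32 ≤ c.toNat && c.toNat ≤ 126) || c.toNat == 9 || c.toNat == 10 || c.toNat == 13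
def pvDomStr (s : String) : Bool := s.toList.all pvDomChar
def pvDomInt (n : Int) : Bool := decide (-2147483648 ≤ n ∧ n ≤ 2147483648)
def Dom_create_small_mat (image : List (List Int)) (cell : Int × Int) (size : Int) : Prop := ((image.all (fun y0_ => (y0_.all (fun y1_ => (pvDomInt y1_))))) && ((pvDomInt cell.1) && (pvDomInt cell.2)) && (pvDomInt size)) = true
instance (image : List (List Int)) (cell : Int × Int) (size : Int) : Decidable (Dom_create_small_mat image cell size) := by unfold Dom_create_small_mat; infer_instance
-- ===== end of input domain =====

-- B replaces A's per-cell bounds branch by "fill each row with the center value, then copy the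
-- contiguous in-bounds slice of the image row" (objective: alternative decomposition).

-- ===== PORT A =====
-- rows[i] / cols[j] (range indexing) is exact as cell-x+i / cell-x+j for 0 ≤ i,j < size,
-- since the ranges have length 2*(size//2)+1 ≥ size whenever the loops run.
-- Python raises on an out-of-range index; pyGetD's default is only reached outside Pre_.
def create_small_mat (image : List (List Int)) (cell : Int × Int) (size : Int) : List (List Int) :=
  (PySem.List.pyRange 0 size 1).foldl (fun mat i =>
    mat ++ [(PySem.List.pyRange 0 size 1).foldl (fun tl j =>
      if cell.1 - PySem.Int.floordiv size 2 + i < 0 ∨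
         (image.length : Int) ≤ cell.1 - PySem.Int.floordiv size 2 + i ∨
         cell.2 - PySem.Int.floordiv size 2 + j < 0 ∨
         ((PySem.List.pyGetD image 0 []).length : Int) ≤ cell.2 - PySem.Int.floordiv size 2 + j then
        tl ++ [PySem.List.pyGetD (PySem.List.pyGetD image cell.1 []) cell.2 0]
      else
        tl ++ [PySem.List.pyGetD (PySem.List.pyGetD image (cell.1 - PySem.Int.floordiv size 2 + i) [])
                 (cell.2 - PySem.Int.floordiv size 2 + j) 0]) []]) []

-- ===== PORT B =====
def create_small_mat_alt (image : List (List Int)) (cell : Int × Int) (size : Int) : List (List Int) :=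
  if size ≤ 0 then []
  else
    let v := PySem.List.pyGetD (PySem.List.pyGetD image cell.1 []) cell.2 0
    let h : Int := image.length
    let w : Int := (PySem.List.pyGetD image 0 []).length
    let c0 := cell.2 - PySem.Int.floordiv size 2
    let lo := max 0 (-c0)
    let hi := min size (w - c0)
    let blank := List.replicate size.toNat v
    (PySem.List.pyRange 0 size 1).foldl (fun mat i =>
      let r := cell.1 - PySem.Int.floordiv size 2 + i
      mat ++ [if 0 ≤ r ∧ r < h ∧ lo < hi then
        List.replicate lo.toNat v ++
        PySem.List.slice (PySem.List.pyGetD image r []) (some (c0 + lo)) (some (c0 + hi)) ++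
        List.replicate (size - hi).toNat v
      else blank]) []

-- ===== PRECONDITION & SPEC =====
-- Pre_ excludes the inputs where A raises: when the loops run (size ≥ 1), A indexes image[0],
-- image[cell[0]][cell[1]] (Python negative indexing allowed) and, on in-bounds cells, rows whose
-- length it assumed equal to len(image[0]); a ragged image can make that last access raise, so we
-- require a rectangular image (a mild narrowing: some ragged images on which A happens to return
-- are excluded).
def Pre_create_small_mat (image : List (List Int)) (cell : Int × Int) (size : Int) : Prop :=
  size ≤ 0 ∨
    (image ≠ [] ∧ (∀ row ∈ image, row.length = (image.headD []).length) ∧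
      PySem.Raise.InRange image.length cell.1 ∧
      PySem.Raise.InRange (image.headD []).length cell.2)
instance (image : List (List Int)) (cell : Int × Int) (size : Int) : Decidable (Pre_create_small_mat image cell size) := by unfold Pre_create_small_mat; infer_instance

def pvWitness_create_small_mat : List (List Int) × (Int × Int) × Int := ([[1, 2], [3, 4]], (0, 1), 3)

def Spec_create_small_mat (image : List (List Int)) (cell : Int × Int) (size : Int) (out : List (List Int)) : Prop := out = create_small_mat_alt image cell size
instance (image : List (List Int)) (cell : Int × Int) (size : Int) (out : List (List Int)) : Decidable (Spec_create_small_mat image cell size out) := by unfold Spec_create_small_mat; infer_instance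

-- ===== CLAIM (what is proved, stated in full; the proofs are below) =====
def Claim_equal_create_small_mat : Prop := ∀ (image : List (List Int)) (cell : Int × Int) (size : Int), Dom_create_small_mat image cell size → Pre_create_small_mat image cell size → Spec_create_small_mat image cell size (create_small_mat image cell size)

-- ===== LEMMAS AND PROOFS =====

-- if-then-append in both branches hoists to append-of-if.
theorem pv_ite_append {α : Type} (c : Prop) [Decidable c] (tl : List α) (a b : α) :
    (if c then tl ++ [a] else tl ++ [b]) = tl ++ [if c then a else b] := by
  split_ifs <;> rfl

-- A map whose values are all v is a replicate.
theorem pv_map_const {α : Type} (l : List Int) (f : Int → α) (v : α)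
    (h : ∀ j ∈ l, f j = v) : l.map f = List.replicate l.length v := by
  induction l with
  | nil => rfl
  | cons a l ih =>
    simp [List.replicate_succ, h a (by simp),
      ih (fun j hj => h j (by simp [hj]))]

-- One valid row: fill-then-slice equals the per-cell branch map.
theorem pv_row_eq (row : List Int) (v c0 size : Int) (hs : 0 < size)
    (hlh : max 0 (-c0) < min size ((row.length : Int) - c0)) :
    List.replicate (max 0 (-c0)).toNat v ++
      PySem.List.slice row (some (c0 + max 0 (-c0))) (some (c0 + min size ((row.length : Int) - c0))) ++
      List.replicate (size - min size ((row.length : Int) - c0)).toNat v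
    = (PySem.List.pyRange 0 size 1).map
        (fun j => if c0 + j < 0 ∨ (row.length : Int) ≤ c0 + j then v
                  else PySem.List.pyGetD row (c0 + j) 0) := by
  set lo := max 0 (-c0) with hlo
  set hi := min size ((row.length : Int) - c0) with hhi
  have ha : 0 ≤ c0 + lo := by omega
  have hb : 0 ≤ c0 + hi := by omega
  rw [PySem.List.slice_toNat row ha hb]
  have hlen : (List.replicate lo.toNat v ++
      List.take ((c0 + hi).toNat - (c0 + lo).toNat) (List.drop (c0 + lo).toNat row) ++
      List.replicate (size - hi).toNat v).length = size.toNat := by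
    simp [List.length_take, List.length_drop]
    omega
  apply List.ext_getElem
  · simp only [hlen, List.length_map, PySem.List.length_pyRange_one]
    omega
  · intro k hk1 hk2
    have hk : k < size.toNat := by omega
    rw [List.getElem_map, PySem.List.getElem_pyRange_one 0 size k (by
      simp only [PySem.List.length_pyRange_one]; omega)]
    by_cases h1 : k < lo.toNat
    · rw [List.getElem_append_left (by simp [List.length_take, List.length_drop]; omega),
        List.getElem_append_left (by simp; omega),
        List.getElem_replicate, if_pos (by omega)]
    · by_cases h2 : k < hi.toNat
      · rw [List.getElem_append_left (by simp [List.length_take, List.length_drop]; omega),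
          List.getElem_append_right (by simp; omega), List.getElem_take, List.getElem_drop,
          if_neg (by simp only [not_or]; omega),
          PySem.List.pyGetD_eq_getElem row 0 (by omega) (by omega)]
        congr 1
        simp only [List.length_replicate]
        omega
      · rw [List.getElem_append_right (by simp [List.length_take, List.length_drop]; omega),
          List.getElem_replicate, if_pos (by omega)]

-- ===== VERDICT (by name: the statement is the Claim_ definition above) =====
theorem create_small_mat_spec : Claim_equal_create_small_mat := by
  intro image cell size _hdom hpre
  unfold Spec_create_small_mat create_small_mat create_small_mat_alt
  by_cases hs : size ≤ 0
  · rw [if_pos hs, PySem.List.pyRange_one_eq_nil hs]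
    rfl
  · rw [if_neg hs]
    replace hs : 0 < size := by omega
    rcases hpre with h | ⟨hne, hrect, hr1, hr2⟩
    · omega
    simp only [pv_ite_append, PySem.List.foldl_append_singleton_eq_map, List.nil_append]
    apply List.map_congr_left
    intro i hi
    rw [PySem.List.mem_pyRange_one] at hi
    set x := PySem.Int.floordiv size 2 with hx
    set v := PySem.List.pyGetD (PySem.List.pyGetD image cell.1 []) cell.2 0 with hv
    set c0 := cell.2 - x with hc0
    set w : Int := ((PySem.List.pyGetD image 0 []).length : Int) with hw
    by_cases hcase : 0 ≤ cell.1 - x + i ∧ cell.1 - x + i < (image.length : Int) ∧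
        max 0 (-c0) < min size (w - c0)
    · rw [if_pos hcase]
      obtain ⟨hr0, hrh, hlh⟩ := hcase
      set row := PySem.List.pyGetD image (cell.1 - x + i) [] with hrow
      have hmem : row ∈ image := PySem.List.pyGetD_mem image [] (by
        unfold PySem.Raise.InRange; omega)
      have hrlen : (row.length : Int) = w := by
        rw [hw]
        have h0 : PySem.List.pyGetD image 0 [] = image.headD [] := by
          rw [PySem.List.pyGetD_zero]
          cases image with
          | nil => rfl
          | cons a l => rfl
        rw [h0]
        exact congrArg Nat.cast (hrect row hmem)
      rw [← hrlen] at hlh ⊢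
      rw [pv_row_eq row v c0 size hs hlh]
      apply List.map_congr_left
      intro j hj
      rw [PySem.List.mem_pyRange_one] at hj
      have hcond : (cell.1 - x + i < 0 ∨ (image.length : Int) ≤ cell.1 - x + i ∨
            c0 + j < 0 ∨ (row.length : Int) ≤ c0 + j)
          ↔ (c0 + j < 0 ∨ (row.length : Int) ≤ c0 + j) := by omega
      rw [if_congr hcond rfl rfl]
    · rw [if_neg hcase]
      rw [pv_map_const _ _ v (fun j hj => by
          rw [PySem.List.mem_pyRange_one] at hj
          rw [if_pos (by omega)]),
        PySem.List.length_pyRange_one]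
      congr 1
      omega
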